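-- pv_equiv track=rewrite | github.com/randreshg/carts | tools/scripts/agents.py | _generate_cursorrules
-- ===== SOURCE A (Python) =====
-- from typing import Dict, Iterable, List, Optional, Tuple
--
-- def _generate_cursorrules(claude_content: str) -> str:
--     """CLAUDE.md -> .cursorrules (system-prompt style)."""
--     lines = claude_content.splitlines()
--     output: List[str] = [
--         "You are working on CARTS, an MLIR-based compiler that transforms OpenMP-annotated",
--         "C/C++ into task-based parallel executables targeting the ARTS asynchronous runtime.",
--         "",
--     ]
--
--     in_section = False
--     keep_sections = {"## Critical Rules", "## Essential Commands", "## Coding Conventions", "## Key Architectural Concepts"}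
--     rename_map = {"## Critical Rules": "## Rules", "## Essential Commands": "## Commands", "## Key Architectural Concepts": "## Key Concepts"}
--
--     for line in lines:
--         if line.startswith("## "):
--             in_section = line in keep_sections
--             if in_section and line in rename_map:
--                 output.append(rename_map[line])
--                 continue
--         if in_section:
--             output.append(line)
--
--     output.extend([
--         "", "## File Locations", "",
--         "- Pass implementations: `lib/arts/passes/opt/` and `lib/arts/passes/transforms/`",
--         "- Analysis: `lib/arts/analysis/`",
--         "- Headers: `include/arts/`",
--         "- Tests: `tests/contracts/` (MLIR lit) and `tests/examples/` (end-to-end)",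
--         "- Pipeline definition: `tools/compile/Compile.cpp`",
--         "",
--     ])
--     return "\n".join(output)
-- ===== SOURCE B (Python) =====
-- from typing import List, Optional, Tuple
--
-- _PRELUDE = [
--     "You are working on CARTS, an MLIR-based compiler that transforms OpenMP-annotated",
--     "C/C++ into task-based parallel executables targeting the ARTS asynchronous runtime.",
--     "",
-- ]
--
-- _TAIL = [
--     "", "## File Locations", "",
--     "- Pass implementations: `lib/arts/passes/opt/` and `lib/arts/passes/transforms/`",
--     "- Analysis: `lib/arts/analysis/`",
--     "- Headers: `include/arts/`",
--     "- Tests: `tests/contracts/` (MLIR lit) and `tests/examples/` (end-to-end)",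
--     "- Pipeline definition: `tools/compile/Compile.cpp`",
--     "",
-- ]
--
-- _KEEP = {"## Critical Rules", "## Essential Commands", "## Coding Conventions", "## Key Architectural Concepts"}
-- _RENAME = {"## Critical Rules": "## Rules", "## Essential Commands": "## Commands", "## Key Architectural Concepts": "## Key Concepts"}
--
--
-- def _generate_cursorrules(claude_content: str) -> str:
--     """CLAUDE.md -> .cursorrules: group lines into sections, then emit kept sections."""
--     # Pass 1: group the lines into (header, body) sections; pre-header lines are dropped.
--     sections: List[Tuple[str, List[str]]] = []
--     header: Optional[str] = None
--     body: List[str] = []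
--     for line in claude_content.splitlines():
--         if line.startswith("## "):
--             if header is not None:
--                 sections.append((header, body))
--             header, body = line, []
--         elif header is not None:
--             body.append(line)
--     if header is not None:
--         sections.append((header, body))
--
--     # Pass 2: emit kept sections (renamed where applicable) between prelude and tail.
--     middle: List[str] = []
--     for h, b in sections:
--         if h in _KEEP:
--             middle.append(_RENAME.get(h, h))
--             middle.extend(b)
--
--     return "\n".join(_PRELUDE + middle + _TAIL)
-- ===== Notes on version B (the rewrite author's own statement) =====
-- stated objective: simpler
-- what changed: B replaces A's single stateful scan (an in_section flag mutated while emitting) with two passes: first group the lines into (header, body) sections, then emit the kept/renamed sections between the fixed prelude and tail.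
import Mathlib
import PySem

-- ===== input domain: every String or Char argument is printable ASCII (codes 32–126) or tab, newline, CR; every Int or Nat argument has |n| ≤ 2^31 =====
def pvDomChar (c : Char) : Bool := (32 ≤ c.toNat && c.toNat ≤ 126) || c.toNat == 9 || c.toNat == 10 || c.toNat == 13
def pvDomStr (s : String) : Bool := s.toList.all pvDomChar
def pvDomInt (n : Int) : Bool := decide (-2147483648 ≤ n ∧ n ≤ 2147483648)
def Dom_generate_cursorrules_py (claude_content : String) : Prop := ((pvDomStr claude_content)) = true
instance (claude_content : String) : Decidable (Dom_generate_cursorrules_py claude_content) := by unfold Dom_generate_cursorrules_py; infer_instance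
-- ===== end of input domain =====

-- B groups lines into (header, body) sections in one pass and then emits the kept sections,
-- replacing A's stateful in_section scan; objective: simpler decomposition, same O(n) cost.


-- ===== PORT A =====
def pvPrelude : List String :=
  [ "You are working on CARTS, an MLIR-based compiler that transforms OpenMP-annotated"
  , "C/C++ into task-based parallel executables targeting the ARTS asynchronous runtime."
  , "" ]

def pvTail : List String :=
  [ "", "## File Locations", ""
  , "- Pass implementations: `lib/arts/passes/opt/` and `lib/arts/passes/transforms/`"
  , "- Analysis: `lib/arts/analysis/`"
  , "- Headers: `include/arts/`"
  , "- Tests: `tests/contracts/` (MLIR lit) and `tests/examples/` (end-to-end)"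
  , "- Pipeline definition: `tools/compile/Compile.cpp`"
  , "" ]

def pvKeep : PySem.Set String :=
  PySem.Set.ofList ["## Critical Rules", "## Essential Commands", "## Coding Conventions", "## Key Architectural Concepts"]

def pvRename : PySem.Dict String String :=
  PySem.Dict.ofList [("## Critical Rules", "## Rules"), ("## Essential Commands", "## Commands"), ("## Key Architectural Concepts", "## Key Concepts")]

-- A's loop body: state = (in_section, output)
def pvStepA (st : Bool × List String) (line : String) : Bool × List String :=
  if PySem.Str.startswith line "## " then
    let inSec := PySem.Set.contains pvKeep line
    if inSec && (pvRename.get? line).isSome then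
      (inSec, st.2 ++ [(pvRename.get? line).getD line])
    else if inSec then (inSec, st.2 ++ [line])
    else (inSec, st.2)
  else if st.1 then (st.1, st.2 ++ [line])
  else st

def generate_cursorrules_py (claude_content : String) : String :=
  let lines := PySem.Str.splitlines claude_content
  let st := lines.foldl pvStepA (false, pvPrelude)
  PySem.Str.join "\n" (st.2 ++ pvTail)

-- ===== PORT B =====
-- pass 1 loop body: state = (current header (if any), its body so far, finished sections)
def pvStepB (st : Option String × List String × List (String × List String)) (line : String) :
    Option String × List String × List (String × List String) :=
  if PySem.Str.startswith line "## " then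
    match st.1 with
    | some h => (some line, [], st.2.2 ++ [(h, st.2.1)])
    | none   => (some line, [], st.2.2)
  else
    match st.1 with
    | some _ => (st.1, st.2.1 ++ [line], st.2.2)
    | none   => st

-- final flush of the pending section ('if header is not None: sections.append(...)')
def pvFlush (hdr : Option String) (body : List String) : List (String × List String) :=
  match hdr with
  | some h => [(h, body)]
  | none   => []

-- pass 2: emit kept sections, renamed where applicable
def pvEmit (secs : List (String × List String)) : List String :=
  secs.flatMap (fun s => if PySem.Set.contains pvKeep s.1 then pvRename.getD s.1 s.1 :: s.2 else [])

def generate_cursorrules_py_alt (claude_content : String) : String :=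
  let st := (PySem.Str.splitlines claude_content).foldl pvStepB (none, [], [])
  PySem.Str.join "\n" (pvPrelude ++ pvEmit (st.2.2 ++ pvFlush st.1 st.2.1) ++ pvTail)

-- ===== PRECONDITION & SPEC =====
def Spec_generate_cursorrules_py (claude_content : String) (out : String) : Prop := out = generate_cursorrules_py_alt claude_content
instance (claude_content : String) (out : String) : Decidable (Spec_generate_cursorrules_py claude_content out) := by unfold Spec_generate_cursorrules_py; infer_instance

-- ===== CLAIM (what is proved, stated in full; the proofs are below) =====
def Claim_equal_generate_cursorrules_py : Prop := ∀ (claude_content : String), Dom_generate_cursorrules_py claude_content → Spec_generate_cursorrules_py claude_content (generate_cursorrules_py claude_content)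

-- ===== LEMMAS AND PROOFS =====

-- A's in_section flag in terms of B's pending header
def pvKept (hdr : Option String) : Bool :=
  match hdr with
  | some h => PySem.Set.contains pvKeep h
  | none   => false

theorem pvEmit_append (s t : List (String × List String)) :
    pvEmit (s ++ t) = pvEmit s ++ pvEmit t := by
  simp [pvEmit]

-- what the current (pending) section will contribute
theorem pvEmit_flush (hdr : Option String) (body : List String) :
    pvEmit (pvFlush hdr body)
      = (match hdr with
         | some h => if PySem.Set.contains pvKeep h then pvRename.getD h h :: body else []
         | none => []) := by
  cases hdr <;> simp [pvFlush, pvEmit]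

-- loop invariant: A's running output = out ++ emitted finished sections ++ pending contribution
theorem pvEmit_nil : pvEmit [] = [] := rfl

theorem pv_loop (lines : List String) :
    ∀ (hdr : Option String) (body : List String)
      (secs : List (String × List String)) (out : List String),
    (lines.foldl pvStepA (pvKept hdr, out ++ pvEmit secs ++ pvEmit (pvFlush hdr body))).2
      = out ++ (let st := lines.foldl pvStepB (hdr, body, secs)
                pvEmit (st.2.2 ++ pvFlush st.1 st.2.1)) := by
  induction lines with
  | nil => intro hdr body secs out; simp [pvEmit_append]
  | cons l rest ih =>
    intro hdr body secs out
    by_cases hh : PySem.Str.startswith l "## " = true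
    · have hA : pvStepA (pvKept hdr, out ++ pvEmit secs ++ pvEmit (pvFlush hdr body)) l
          = (pvKept (some l),
             out ++ pvEmit (secs ++ pvFlush hdr body) ++ pvEmit (pvFlush (some l) [])) := by
        simp only [pvStepA, pvKept, pvEmit_append, pvEmit_flush]
        simp at hh
        cases hk : PySem.Set.contains pvKeep l
        · simp [hh]
        · cases hr : (pvRename.get? l) <;> simp [hh, hr, PySem.Dict.getD]
      have hB : pvStepB (hdr, body, secs) l
          = (some l, [], secs ++ pvFlush hdr body) := by
        simp at hh
        cases hdr <;> simp [pvStepB, hh, pvFlush]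
      rw [List.foldl_cons, List.foldl_cons, hA, hB]
      exact ih (some l) [] (secs ++ pvFlush hdr body) out
    · simp at hh
      cases hdr with
      | none =>
        have hA : pvStepA (pvKept (none : Option String),
              out ++ pvEmit secs ++ pvEmit (pvFlush none body)) l
            = (pvKept (none : Option String), out ++ pvEmit secs ++ pvEmit (pvFlush none body)) := by
          simp [pvStepA, pvKept, hh]
        have hB : pvStepB (none, body, secs) l = (none, body, secs) := by
          simp [pvStepB, hh]
        rw [List.foldl_cons, List.foldl_cons, hA, hB]
        exact ih none body secs out
      | some h =>
        have hA : pvStepA (pvKept (some h), out ++ pvEmit secs ++ pvEmit (pvFlush (some h) body)) l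
            = (pvKept (some h), out ++ pvEmit secs ++ pvEmit (pvFlush (some h) (body ++ [l]))) := by
          simp only [pvStepA, pvKept, pvEmit_flush]
          cases hk : PySem.Set.contains pvKeep h <;> simp [hh]
        have hB : pvStepB (some h, body, secs) l = (some h, body ++ [l], secs) := by
          simp [pvStepB, hh]
        rw [List.foldl_cons, List.foldl_cons, hA, hB]
        exact ih (some h) (body ++ [l]) secs out

-- ===== VERDICT (by name: the statement is the Claim_ definition above) =====
theorem generate_cursorrules_py_spec : Claim_equal_generate_cursorrules_py := by
  intro c _
  show generate_cursorrules_py c = generate_cursorrules_py_alt c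
  unfold generate_cursorrules_py generate_cursorrules_py_alt
  have h := pv_loop (PySem.Str.splitlines c) none [] [] pvPrelude
  simp only [show pvKept none = false from rfl, show pvFlush (none : Option String) [] = [] from rfl,
    pvEmit_nil, List.append_nil] at h
  dsimp only
  rw [h, List.append_assoc]
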